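-- pv_equiv track=rewrite | github.com/testzer0/AmbiQT | benchmark/tbl-agg/generate.py | normalize_sql
-- ===== SOURCE A (Python) =====
-- def lower(s):
--     s = s.replace("``", "`")
--     lowers = ""
--     current_quote = None
--     for c in s:
--         if current_quote is None:
--             lowers += c.lower()
--             if c in ['"', '\'', '`']:
--                 current_quote = c
--         else:
--             lowers += c
--             if c == current_quote:
--                 current_quote = None
--     return lowers
--
-- def normalize_sql(sql):
--     if len(sql) == 0:
--         return ""
--     if sql[-1] == ';':
--         sql = sql[:-1]
--     sql = " ".join(lower(sql).strip().split())
--     sql = sql.replace(" ,", ",").replace("( ", "(").replace(" )", ")")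
--     for kword in ["count", "avg", "sum", "min", "max"]:
--         sql = sql.replace(kword+" (", kword+"(")
--     return sql.replace(") ,", "),")
-- ===== SOURCE B (Python) =====
-- def _lower(s):
--     # segment-wise: lowercase unquoted spans, copy quoted spans verbatim
--     s = s.replace("``", "`")
--     out = []
--     rest = s
--     while rest:
--         i = next((k for k, c in enumerate(rest) if c in '"\'`'), -1)
--         if i == -1:
--             out.append(rest.lower())
--             break
--         out.append(rest[:i+1].lower())
--         q = rest[i]
--         rest = rest[i+1:]
--         p = rest.find(q)
--         if p == -1:
--             out.append(rest)
--             break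
--         out.append(rest[:p+1])
--         rest = rest[p+1:]
--     return "".join(out)
--
-- def normalize_sql(sql):
--     if len(sql) == 0:
--         return ""
--     if sql[-1] == ';':
--         sql = sql[:-1]
--     sql = " ".join(_lower(sql).strip().split())
--     sql = sql.replace(" ,", ",").replace("( ", "(").replace(" )", ")")
--     for kword in ["count", "avg", "sum", "min", "max"]:
--         sql = sql.replace(kword+" (", kword+"(")
--     return sql.replace(") ,", "),")
-- ===== Notes on version B (the rewrite author's own statement) =====
-- stated objective: alternative
-- what changed: The quote-aware lowercasing is rewritten from A's char-by-char loop with a current_quote state variable into a segment partition: B repeatedly finds the next quote, lowercases the unquoted span up to and including it, copies the quoted span verbatim through its matching closer (or the unterminated tail), and concatenates; the surrounding replace/strip/split/join chain is unchanged.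
import Mathlib
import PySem

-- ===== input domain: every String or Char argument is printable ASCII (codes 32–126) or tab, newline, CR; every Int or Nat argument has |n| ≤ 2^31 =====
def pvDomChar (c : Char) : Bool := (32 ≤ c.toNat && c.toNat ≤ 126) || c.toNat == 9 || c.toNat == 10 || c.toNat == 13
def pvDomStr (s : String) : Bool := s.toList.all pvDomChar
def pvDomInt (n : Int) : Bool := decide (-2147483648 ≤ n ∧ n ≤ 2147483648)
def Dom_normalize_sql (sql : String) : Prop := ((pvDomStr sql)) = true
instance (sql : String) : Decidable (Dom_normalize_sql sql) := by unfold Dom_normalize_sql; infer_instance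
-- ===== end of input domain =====

-- B replaces A's char-by-char quote-state loop with a segment partition (lower each unquoted span,
-- copy each quoted span verbatim); the surrounding replace/split chain is unchanged. Objective: alternative.

-- the quote character class both versions test against
def pvQuote (c : Char) : Bool := c == '"' || c == '\'' || c == '`'

-- ===== PORT A =====
-- A's loop body: state = (output so far, current_quote)
def pvStepA (st : List Char × Option Char) (c : Char) : List Char × Option Char :=
  match st.2 with
  | none => (st.1 ++ [PySem.Chars.lowerChar c], if pvQuote c then some c else none)
  | some q => (st.1 ++ [c], if c == q then none else some q)

def pvLowerA (s : String) : String :=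
  String.ofList (((PySem.Str.replace s "``" "`").toList.foldl pvStepA ([], none)).1)

def normalize_sql (sql : String) : String :=
  if PySem.Str.len sql = 0 then "" else
  let sql := if PySem.Str.pyGet? sql (-1) = some ';' then PySem.Str.slice sql none (some (-1)) else sql
  let sql := PySem.Str.join " " (PySem.Str.split₀ (PySem.Str.strip (pvLowerA sql)))
  let sql := PySem.Str.replace (PySem.Str.replace (PySem.Str.replace sql " ," ",") "( " "(") " )" ")"
  let sql := ["count", "avg", "sum", "min", "max"].foldl
    (fun s k => PySem.Str.replace s (k ++ " (") (k ++ "(")) sql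
  PySem.Str.replace sql ") ," "),"

-- ===== PORT B =====
-- one iteration of Source B's while loop: lower up to and including the next quote, copy the quoted
-- span through its matching closer verbatim, continue on the remainder
def pvSegLoop (cs : List Char) : List Char :=
  match h : cs.dropWhile (fun c => !pvQuote c) with
  | [] => PySem.Chars.lower cs
  | q :: rest =>
    let pre := PySem.Chars.lower (cs.takeWhile (fun c => !pvQuote c) ++ [q])
    match h2 : rest.dropWhile (fun c => !(c == q)) with
    | [] => pre ++ rest
    | _ :: rest2 => pre ++ rest.takeWhile (fun c => !(c == q)) ++ [q] ++ pvSegLoop rest2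
termination_by cs.length
decreasing_by
  have hs1 : q :: rest <:+ cs := h ▸ List.dropWhile_suffix _
  have hs2 : _ :: rest2 <:+ rest := h2 ▸ List.dropWhile_suffix _
  have t1 := hs1.length_le
  have t2 := hs2.length_le
  simp at t1 t2
  omega

def pvLowerB (s : String) : String :=
  String.ofList (pvSegLoop (PySem.Str.replace s "``" "`").toList)

def normalize_sql_alt (sql : String) : String :=
  if PySem.Str.len sql = 0 then "" else
  let sql := if PySem.Str.pyGet? sql (-1) = some ';' then PySem.Str.slice sql none (some (-1)) else sql
  let sql := PySem.Str.join " " (PySem.Str.split₀ (PySem.Str.strip (pvLowerB sql)))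
  let sql := PySem.Str.replace (PySem.Str.replace (PySem.Str.replace sql " ," ",") "( " "(") " )" ")"
  let sql := ["count", "avg", "sum", "min", "max"].foldl
    (fun s k => PySem.Str.replace s (k ++ " (") (k ++ "(")) sql
  PySem.Str.replace sql ") ," "),"

-- ===== PRECONDITION & SPEC =====
def Spec_normalize_sql (sql : String) (out : String) : Prop := out = normalize_sql_alt sql
instance (sql : String) (out : String) : Decidable (Spec_normalize_sql sql out) := by unfold Spec_normalize_sql; infer_instance

-- ===== CLAIM (what is proved, stated in full; the proofs are below) =====
def Claim_equal_normalize_sql : Prop := ∀ (sql : String), Dom_normalize_sql sql → Spec_normalize_sql sql (normalize_sql sql)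

-- ===== LEMMAS AND PROOFS =====

-- the tail B produces while inside a quoted span opened by q
def pvQuotedPart (q : Char) (cs : List Char) : List Char :=
  match cs.dropWhile (fun c => !(c == q)) with
  | [] => cs
  | _ :: rest2 => cs.takeWhile (fun c => !(c == q)) ++ [q] ++ pvSegLoop rest2

theorem pvSegLoop_eq_nil (cs : List Char) (h : cs.dropWhile (fun c => !pvQuote c) = []) :
    pvSegLoop cs = PySem.Chars.lower cs := by
  rw [pvSegLoop]
  split
  · rfl
  all_goals (rename_i heq; rw [h] at heq; cases heq)

theorem pvSegLoop_eq_cons (cs : List Char) (q : Char) (rest : List Char)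
    (h : cs.dropWhile (fun c => !pvQuote c) = q :: rest) :
    pvSegLoop cs = PySem.Chars.lower (cs.takeWhile (fun c => !pvQuote c) ++ [q]) ++ pvQuotedPart q rest := by
  rw [pvSegLoop]
  split
  · rename_i heq; rw [h] at heq; cases heq
  · rename_i q' rest' heq
    rw [h] at heq; injection heq with e1 e2; subst e1; subst e2
    rw [pvQuotedPart]
    split
    · rename_i heq2; rw [heq2]
    · rename_i x rest2 heq2; rw [heq2]; simp

theorem pvSegLoop_nil : pvSegLoop [] = [] := by
  rw [pvSegLoop_eq_nil [] rfl]; simp [PySem.Chars.lower]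

theorem pvSegLoop_cons_not (c : Char) (cs : List Char) (h : pvQuote c = false) :
    pvSegLoop (c :: cs) = PySem.Chars.lowerChar c :: pvSegLoop cs := by
  have hdw : List.dropWhile (fun x => !pvQuote x) (c :: cs)
      = List.dropWhile (fun x => !pvQuote x) cs := List.dropWhile_cons_of_pos (by simp [h])
  have htw : List.takeWhile (fun x => !pvQuote x) (c :: cs)
      = c :: List.takeWhile (fun x => !pvQuote x) cs := List.takeWhile_cons_of_pos (by simp [h])
  cases hd : List.dropWhile (fun x => !pvQuote x) cs with
  | nil => rw [pvSegLoop_eq_nil _ (hdw.trans hd), pvSegLoop_eq_nil _ hd]; simp [PySem.Chars.lower]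
  | cons q rest =>
      rw [pvSegLoop_eq_cons _ _ _ (hdw.trans hd), pvSegLoop_eq_cons _ _ _ hd, htw]
      simp [PySem.Chars.lower]

theorem pvSegLoop_cons_quote (c : Char) (cs : List Char) (h : pvQuote c = true) :
    pvSegLoop (c :: cs) = PySem.Chars.lowerChar c :: pvQuotedPart c cs := by
  have hdw : List.dropWhile (fun x => !pvQuote x) (c :: cs) = c :: cs :=
    List.dropWhile_cons_of_neg (by simp [h])
  have htw : List.takeWhile (fun x => !pvQuote x) (c :: cs) = [] :=
    List.takeWhile_cons_of_neg (by simp [h])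
  rw [pvSegLoop_eq_cons _ _ _ hdw, htw]
  simp [PySem.Chars.lower]

theorem pvQuotedPart_cons_ne (q c : Char) (cs : List Char) (h : (c == q) = false) :
    pvQuotedPart q (c :: cs) = c :: pvQuotedPart q cs := by
  have hdw : List.dropWhile (fun x => !(x == q)) (c :: cs)
      = List.dropWhile (fun x => !(x == q)) cs := List.dropWhile_cons_of_pos (by simp [h])
  have htw : List.takeWhile (fun x => !(x == q)) (c :: cs)
      = c :: List.takeWhile (fun x => !(x == q)) cs := List.takeWhile_cons_of_pos (by simp [h])
  rw [pvQuotedPart, pvQuotedPart, hdw, htw]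
  cases hd : List.dropWhile (fun x => !(x == q)) cs <;> simp

theorem pvQuotedPart_cons_eq (q : Char) (cs : List Char) :
    pvQuotedPart q (q :: cs) = q :: pvSegLoop cs := by
  have hdw : List.dropWhile (fun x => !(x == q)) (q :: cs) = q :: cs :=
    List.dropWhile_cons_of_neg (by simp)
  have htw : List.takeWhile (fun x => !(x == q)) (q :: cs) = [] :=
    List.takeWhile_cons_of_neg (by simp)
  rw [pvQuotedPart, hdw, htw]
  simp

theorem pv_fold_eq (cs : List Char) (acc : List Char) :
    ((cs.foldl pvStepA (acc, none)).1 = acc ++ pvSegLoop cs) ∧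
    (∀ q, (cs.foldl pvStepA (acc, some q)).1 = acc ++ pvQuotedPart q cs) := by
  induction cs generalizing acc with
  | nil =>
    constructor
    · simp [pvSegLoop_nil]
    · intro q; simp [pvQuotedPart]
  | cons c cs ih =>
    constructor
    · simp only [List.foldl_cons, pvStepA]
      by_cases h : pvQuote c = true
      · rw [if_pos h]
        rw [(ih (acc ++ [PySem.Chars.lowerChar c])).2 c]
        rw [pvSegLoop_cons_quote c cs h]
        simp
      · rw [if_neg h]
        rw [(ih (acc ++ [PySem.Chars.lowerChar c])).1]
        rw [pvSegLoop_cons_not c cs (by simpa using h)]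
        simp
    · intro q
      simp only [List.foldl_cons, pvStepA]
      by_cases h : (c == q) = true
      · rw [if_pos h]
        rw [(ih (acc ++ [c])).1]
        have hc : c = q := by simpa using h
        subst hc
        rw [pvQuotedPart_cons_eq]
        simp
      · rw [if_neg h]
        rw [(ih (acc ++ [c])).2 q]
        rw [pvQuotedPart_cons_ne q c cs (by simpa using h)]
        simp

theorem pvLower_eq (s : String) : pvLowerA s = pvLowerB s := by
  have h := (pv_fold_eq (PySem.Str.replace s "``" "`").toList []).1
  rw [List.nil_append] at h
  unfold pvLowerA pvLowerB
  exact congrArg String.ofList h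

-- ===== VERDICT (by name: the statement is the Claim_ definition above) =====
theorem normalize_sql_spec : Claim_equal_normalize_sql := by
  intro sql _
  unfold Spec_normalize_sql normalize_sql normalize_sql_alt
  simp only [pvLower_eq]
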